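-- pv_equiv track=rewrite | github.com/ELC/practica-frro-revised | practico_01/ejercicio_13.py | suma_cubo_pares
-- ===== SOURCE A (Python) =====
-- from typing import Iterable
--
-- def suma_cubo_pares(numeros: Iterable[int]) -> int:
--     cubos = []
--     for numero in numeros:
--         cubos.append(numero ** 3)
--
--     suma_pares = 0
--     for numero in cubos:
--         if numero % 2 == 0:
--             suma_pares += numero
--
--     return suma_pares
-- ===== SOURCE B (Python) =====
-- def suma_cubo_pares(numeros):
--     # single fused pass: a number's cube is even iff the number is even
--     return sum(n ** 3 for n in numeros if n % 2 == 0)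
-- ===== Notes on version B (the rewrite author's own statement) =====
-- stated objective: simpler
-- what changed: Replaces A's two staged passes (build a list of all cubes, then scan it summing the even ones) with one fused generator pass that tests the number's parity directly (cube even iff number even), cubing only the even numbers and never materialising the intermediate list.
import Mathlib
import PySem

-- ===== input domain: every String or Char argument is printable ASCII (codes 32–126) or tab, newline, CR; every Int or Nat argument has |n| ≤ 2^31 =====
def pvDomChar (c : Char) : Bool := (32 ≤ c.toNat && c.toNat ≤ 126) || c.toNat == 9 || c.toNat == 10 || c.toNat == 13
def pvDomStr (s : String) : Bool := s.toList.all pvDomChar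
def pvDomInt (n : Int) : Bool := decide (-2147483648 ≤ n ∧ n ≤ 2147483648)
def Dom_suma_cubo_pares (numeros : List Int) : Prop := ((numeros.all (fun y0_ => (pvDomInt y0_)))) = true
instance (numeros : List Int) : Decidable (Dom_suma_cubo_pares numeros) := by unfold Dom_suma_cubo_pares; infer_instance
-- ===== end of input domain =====

-- B fuses A's two passes into one and tests the number's parity instead of the cube's; same result.

-- ===== PORT A =====
def suma_cubo_pares (numeros : List Int) : Int :=
  let cubos := numeros.foldl (fun acc numero => acc ++ [numero ^ 3]) []
  cubos.foldl (fun suma_pares numero =>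
    if PySem.Int.mod numero 2 = 0 then suma_pares + numero else suma_pares) 0

-- ===== PORT B =====
def suma_cubo_pares_alt (numeros : List Int) : Int :=
  numeros.foldl (fun s n => if PySem.Int.mod n 2 = 0 then s + n ^ 3 else s) 0

-- ===== PRECONDITION & SPEC =====
def Spec_suma_cubo_pares (numeros : List Int) (out : Int) : Prop := out = suma_cubo_pares_alt numeros
instance (numeros : List Int) (out : Int) : Decidable (Spec_suma_cubo_pares numeros out) := by unfold Spec_suma_cubo_pares; infer_instance

-- ===== CLAIM (what is proved, stated in full; the proofs are below) =====
def Claim_equal_suma_cubo_pares : Prop := ∀ (numeros : List Int), Dom_suma_cubo_pares numeros → Spec_suma_cubo_pares numeros (suma_cubo_pares numeros)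

-- ===== LEMMAS AND PROOFS =====

-- a cube is even exactly when the number is even
theorem pv_mod_cube (n : Int) : PySem.Int.mod (n ^ 3) 2 = 0 ↔ PySem.Int.mod n 2 = 0 := by
  rw [PySem.Int.mod_eq_zero_iff_dvd, PySem.Int.mod_eq_zero_iff_dvd]
  exact ⟨fun h => Int.prime_two.dvd_of_dvd_pow h, fun h => dvd_pow h (by norm_num)⟩

-- A's second fold over (acc ++ [cubes of l]) equals B's fused fold, for any prefix acc and sums
theorem pv_fused (l : List Int) (acc : List Int) (s : Int) :
    (List.foldl (fun a n => a ++ [n ^ 3]) acc l).foldl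
      (fun sp c => if PySem.Int.mod c 2 = 0 then sp + c else sp) s
    = l.foldl (fun t n => if PySem.Int.mod n 2 = 0 then t + n ^ 3 else t)
        (acc.foldl (fun sp c => if PySem.Int.mod c 2 = 0 then sp + c else sp) s) := by
  induction l generalizing acc with
  | nil => simp
  | cons n l ih =>
      simp only [List.foldl_cons, ih, List.foldl_append, List.foldl_cons, List.foldl_nil]
      rw [if_congr (pv_mod_cube n) rfl rfl]

-- ===== VERDICT (by name: the statement is the Claim_ definition above) =====
theorem suma_cubo_pares_spec : Claim_equal_suma_cubo_pares := by
  intro numeros _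
  unfold Spec_suma_cubo_pares suma_cubo_pares suma_cubo_pares_alt
  simpa using pv_fused numeros [] 0
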